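-- pv_equiv track=rewrite | github.com/RhitiB/ReactorSpectrumCalculator | spectra_trial_3.py | longest_sublist_with_max_value
-- ===== SOURCE A (Python) =====
-- def longest_sublist_with_max_value(lst):
--     max_value = float('-inf')  # Initializing max_value as negative infinity
--     longest_sublist = []
--     for sublist in lst:
--         sublist_max = max(sublist)  # Find the maximum value in the sublist
--         if sublist_max > max_value:
--             max_value = sublist_max
--             longest_sublist = sublist
--         elif sublist_max == max_value and len(sublist) > len(longest_sublist):
--             longest_sublist = sublist
--     return longest_sublist
-- ===== SOURCE B (Python) =====
-- def longest_sublist_with_max_value(lst):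
--     if not lst:
--         return []
--     global_max = max(max(s) for s in lst)
--     return max((s for s in lst if max(s) == global_max), key=len)
-- ===== Notes on version B (the rewrite author's own statement) =====
-- stated objective: simpler
-- what changed: Replaces the single stateful loop tracking (running max, current best) with two declarative passes: compute the global maximum of the sublist maxima, then pick the first longest sublist attaining it via max(key=len).
import Mathlib
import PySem

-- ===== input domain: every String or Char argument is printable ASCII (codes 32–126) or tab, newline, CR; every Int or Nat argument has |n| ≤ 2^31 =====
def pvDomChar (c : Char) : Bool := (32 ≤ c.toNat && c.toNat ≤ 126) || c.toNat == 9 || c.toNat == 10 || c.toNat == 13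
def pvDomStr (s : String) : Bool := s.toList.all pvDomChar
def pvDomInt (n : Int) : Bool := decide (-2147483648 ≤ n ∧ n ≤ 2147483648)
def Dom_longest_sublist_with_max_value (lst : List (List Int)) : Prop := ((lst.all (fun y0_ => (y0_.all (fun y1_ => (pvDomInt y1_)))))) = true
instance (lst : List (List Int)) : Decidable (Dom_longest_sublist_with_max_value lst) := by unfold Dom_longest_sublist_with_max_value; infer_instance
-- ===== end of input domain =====

-- B replaces A's single stateful loop by two declarative passes (global max of the
-- sublist maxima, then first longest sublist attaining it): simpler, same cost.


-- ===== PORT A =====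
-- the for-loop, state = (max_value : Option Int — none is float('-inf'), longest_sublist);
-- returns none where Python raises (max([]) : ValueError, excluded by Pre_)
def pvALoop : List (List Int) → Option Int → List Int → Option (Option Int × List Int)
  | [], max_value, longest_sublist => some (max_value, longest_sublist)
  | sublist :: rest, max_value, longest_sublist =>
    match PySem.List.max? sublist (fun x => x) with
    | none => none                      -- max([]) raises ValueError
    | some sublist_max =>
      match max_value with
      | none => pvALoop rest (some sublist_max) sublist      -- sublist_max > -inf
      | some mv =>
        if mv < sublist_max then pvALoop rest (some sublist_max) sublist
        else if sublist_max = mv ∧ longest_sublist.length < sublist.length then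
          pvALoop rest (some mv) sublist
        else pvALoop rest (some mv) longest_sublist

def longest_sublist_with_max_value (lst : List (List Int)) : List Int :=
  match pvALoop lst none [] with
  | none => []                          -- Python raises here (outside Pre_)
  | some (_, longest_sublist) => longest_sublist

-- ===== PORT B =====
-- max(s) as a total value; for s = [] Python raises (outside Pre_), here defaulted
def pvBMax (s : List Int) : Int := (PySem.List.max? s (fun x => x)).getD 0

def longest_sublist_with_max_value_alt (lst : List (List Int)) : List Int :=
  if lst = [] then []
  else
    match PySem.List.max? (lst.map pvBMax) (fun x => x) with
    | none => []                        -- unreachable: lst ≠ []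
    | some global_max =>
      (PySem.List.max? (lst.filter (fun s => pvBMax s == global_max))
        (fun s => s.length)).getD []

-- ===== PRECONDITION & SPEC =====
-- Pre_ excludes exactly the inputs containing an empty sublist, on which A (and B) raise ValueError from max([]).
def Pre_longest_sublist_with_max_value (lst : List (List Int)) : Prop := ∀ s ∈ lst, s ≠ []
instance (lst : List (List Int)) : Decidable (Pre_longest_sublist_with_max_value lst) := by unfold Pre_longest_sublist_with_max_value; infer_instance
def pvWitness_longest_sublist_with_max_value : List (List Int) := [[1, 2], [2]]

def Spec_longest_sublist_with_max_value (lst : List (List Int)) (out : List Int) : Prop := out = longest_sublist_with_max_value_alt lst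
instance (lst : List (List Int)) (out : List Int) : Decidable (Spec_longest_sublist_with_max_value lst out) := by unfold Spec_longest_sublist_with_max_value; infer_instance

-- ===== CLAIM (what is proved, stated in full; the proofs are below) =====
def Claim_equal_longest_sublist_with_max_value : Prop := ∀ (lst : List (List Int)), Dom_longest_sublist_with_max_value lst → Pre_longest_sublist_with_max_value lst → Spec_longest_sublist_with_max_value lst (longest_sublist_with_max_value lst)

-- ===== LEMMAS AND PROOFS =====

-- the global maximum B computes, as a plain value (for nonempty lst)
def pvG (lst : List (List Int)) : Int := (PySem.List.max? (lst.map pvBMax) (fun x => x)).getD 0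
-- the selection B makes
def pvSel (lst : List (List Int)) : List Int :=
  (PySem.List.max? (lst.filter (fun s => pvBMax s == pvG lst)) (fun s => s.length)).getD []

lemma maxq_append_singleton {α κ : Type} [LinearOrder κ] (xs : List α) (x : α) (key : α → κ) :
    PySem.List.max? (xs ++ [x]) key =
      match PySem.List.max? xs key with
      | none => some x
      | some m => if key m < key x then some x else some m := by
  have h : PySem.List.max? (xs ++ [x]) key =
      (fun (acc : Option α) (y : α) => match acc with
        | none => some y
        | some m => if key m < key y then some y else some m) (PySem.List.max? xs key) x := by
    unfold PySem.List.max?; rw [List.foldl_append]; rfl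
  rw [h]

lemma pvALoop_cons (t : List Int) (rest : List (List Int)) (mv : Option Int) (lg : List Int) :
    pvALoop (t :: rest) mv lg =
      match PySem.List.max? t (fun x => x) with
      | none => none
      | some m =>
        match mv with
        | none => pvALoop rest (some m) t
        | some mvv =>
          if mvv < m then pvALoop rest (some m) t
          else if m = mvv ∧ lg.length < t.length then pvALoop rest (some mvv) t
          else pvALoop rest (some mvv) lg := rfl

lemma pvALoop_append (l : List (List Int)) (s : List Int) (mv : Option Int) (lg : List Int)
    (st : Option Int × List Int) (h : pvALoop l mv lg = some st) :
    pvALoop (l ++ [s]) mv lg = pvALoop [s] st.1 st.2 := by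
  induction l generalizing mv lg with
  | nil =>
    simp only [pvALoop] at h
    cases h; rfl
  | cons t rest ih =>
    rw [pvALoop_cons] at h
    conv_lhs => rw [show t :: rest ++ [s] = t :: (rest ++ [s]) from rfl, pvALoop_cons]
    cases hm : PySem.List.max? t (fun x => x) with
    | none => simp only [hm] at h; exact absurd h (by simp)
    | some m =>
      simp only [hm] at h ⊢
      cases mv with
      | none => exact ih _ _ h
      | some mvv =>
        simp only at h ⊢
        by_cases h1 : mvv < m
        · rw [if_pos h1] at h ⊢; exact ih _ _ h
        · rw [if_neg h1] at h ⊢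
          by_cases h2 : m = mvv ∧ lg.length < t.length
          · rw [if_pos h2] at h ⊢; exact ih _ _ h
          · rw [if_neg h2] at h ⊢; exact ih _ _ h

lemma pvBMax_of_ne_nil {s : List Int} (h : s ≠ []) :
    PySem.List.max? s (fun x => x) = some (pvBMax s) := by
  cases hm : PySem.List.max? s (fun x => x) with
  | none => exact absurd ((PySem.List.max?_eq_none_iff s fun x => x).mp hm) h
  | some m => simp [pvBMax, hm]

lemma maxes_max_eq {lst : List (List Int)} (h : lst ≠ []) :
    PySem.List.max? (lst.map pvBMax) (fun x => x) = some (pvG lst) := by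
  cases hm : PySem.List.max? (lst.map pvBMax) (fun x => x) with
  | none =>
    have := (PySem.List.max?_eq_none_iff _ _).mp hm
    simp [List.map_eq_nil_iff] at this
    exact absurd this h
  | some m => simp [pvG, hm]

lemma pvBMax_le_pvG {l : List (List Int)} (hl : l ≠ []) {t : List Int} (ht : t ∈ l) :
    pvBMax t ≤ pvG l :=
  PySem.List.max?_isMax (maxes_max_eq hl) _ (List.mem_map_of_mem ht)

lemma pvG_attained {l : List (List Int)} (hl : l ≠ []) : ∃ t ∈ l, pvBMax t = pvG l := by
  have h := PySem.List.max?_mem (maxes_max_eq hl)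
  rw [List.mem_map] at h
  obtain ⟨t, ht, he⟩ := h
  exact ⟨t, ht, he⟩

lemma pvG_append {l : List (List Int)} (hl : l ≠ []) (s : List Int) :
    pvG (l ++ [s]) = if pvG l < pvBMax s then pvBMax s else pvG l := by
  unfold pvG
  rw [List.map_append, List.map_singleton, maxq_append_singleton, maxes_max_eq hl]
  by_cases h1 : pvG l < pvBMax s
  · simp [h1]
  · simp [h1]

lemma pvSel_some {l : List (List Int)} (hl : l ≠ []) :
    PySem.List.max? (l.filter (fun s => pvBMax s == pvG l)) (fun s => s.length) = some (pvSel l) := by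
  obtain ⟨t, ht, he⟩ := pvG_attained hl
  have htf : t ∈ l.filter (fun s => pvBMax s == pvG l) := by
    rw [List.mem_filter]; exact ⟨ht, by simp [he]⟩
  cases hm : PySem.List.max? (l.filter (fun s => pvBMax s == pvG l)) (fun s => s.length) with
  | none =>
    have := (PySem.List.max?_eq_none_iff _ _).mp hm
    rw [this] at htf; exact absurd htf (List.not_mem_nil)
  | some m => simp [pvSel, hm]

-- the main invariant, by reverse induction on lst
lemma pvMain : ∀ (lst : List (List Int)), (∀ s ∈ lst, s ≠ []) → lst ≠ [] →
    pvALoop lst none [] = some (some (pvG lst), pvSel lst) := by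
  intro lst
  induction lst using List.reverseRecOn with
  | nil => intro _ h; exact absurd rfl h
  | append_singleton l s ih =>
    intro hne _
    have hs : s ≠ [] := hne s (by simp)
    by_cases hl : l = []
    · subst hl
      rw [List.nil_append, pvALoop_cons, pvBMax_of_ne_nil hs]
      simp only [pvALoop]
      unfold pvSel pvG
      simp [PySem.List.max?, List.filter]
    · have hnl : ∀ t ∈ l, t ≠ [] := fun t ht => hne t (by simp [ht])
      rw [pvALoop_append l s none [] _ (ih hnl hl), pvALoop_cons, pvBMax_of_ne_nil hs]
      simp only
      have hfa : (l ++ [s]).filter (fun u => pvBMax u == pvG (l ++ [s]))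
          = l.filter (fun u => pvBMax u == pvG (l ++ [s]))
            ++ [s].filter (fun u => pvBMax u == pvG (l ++ [s])) := by rw [List.filter_append]
      by_cases h1 : pvG l < pvBMax s
      · -- new strict maximum: only s survives the filter
        have hg : pvG (l ++ [s]) = pvBMax s := by rw [pvG_append hl s, if_pos h1]
        have hfl : l.filter (fun u => pvBMax u == pvG (l ++ [s])) = [] := by
          rw [List.filter_eq_nil_iff]
          intro t ht
          simp only [beq_iff_eq, hg]
          exact fun he => absurd (he ▸ pvBMax_le_pvG hl ht) (not_le.mpr h1)
        rw [if_pos h1]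
        unfold pvSel
        rw [hfa, hfl, hg, List.nil_append]
        simp only [List.filter, beq_self_eq_true]
        simp [PySem.List.max?]
        rfl
      · rw [if_neg h1]
        have hg : pvG (l ++ [s]) = pvG l := by rw [pvG_append hl s, if_neg h1]
        by_cases h2 : pvBMax s = pvG l
        · -- tie: s joins the candidates at the end
          have hfs : [s].filter (fun u => pvBMax u == pvG (l ++ [s])) = [s] := by
            simp [List.filter, hg, h2]
          have hsel : pvSel (l ++ [s]) =
              if (pvSel l).length < s.length then s else pvSel l := by
            unfold pvSel
            rw [hfa, hfs, hg, maxq_append_singleton, pvSel_some hl]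
            by_cases h3 : (pvSel l).length < s.length
            · simp [h3]
            · simp [h3]
          by_cases h3 : (pvSel l).length < s.length
          · rw [if_pos ⟨h2, h3⟩, hsel, if_pos h3, hg]; rfl
          · rw [if_neg (by rintro ⟨_, hc⟩; exact h3 hc), hsel, if_neg h3, hg]; rfl
        · -- strictly smaller: nothing changes
          have hfs : [s].filter (fun u => pvBMax u == pvG (l ++ [s])) = [] := by
            simp only [List.filter, hg]
            rw [beq_eq_false_iff_ne.mpr h2]
          have hsel : pvSel (l ++ [s]) = pvSel l := by
            unfold pvSel
            rw [hfa, hfs, hg, List.append_nil, pvSel_some hl]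
          rw [if_neg (by rintro ⟨hc, _⟩; exact h2 hc), hsel, hg]; rfl

-- ===== VERDICT (by name: the statement is the Claim_ definition above) =====
theorem longest_sublist_with_max_value_spec : Claim_equal_longest_sublist_with_max_value := by
  intro lst _ hpre
  unfold Spec_longest_sublist_with_max_value
  by_cases hn : lst = []
  · subst hn; rfl
  · unfold longest_sublist_with_max_value longest_sublist_with_max_value_alt
    rw [pvMain lst hpre hn, if_neg hn, maxes_max_eq hn]
    rfl
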